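-- pv_equiv track=rewrite | github.com/VosDeMens/Toki-Musi | src/words.py | find_index_after_number
-- ===== SOURCE A (Python) =====
-- def find_index_after_number(s: str) -> int:
--     """Finds the index after the first number in `s`.
--
--     Parameters
--     ----------
--     s : str
--         Notes string.
--
--     Returns
--     -------
--     int
--         Index after the first number in `s`.
--     """
--     number_found = False
--     for i, char in enumerate(s):
--         if char.isdigit():
--             number_found = True
--         elif number_found:
--             return i
--     return -1
-- ===== SOURCE B (Python) =====
-- def find_index_after_number(s: str) -> int:
--     """Two-phase: locate first digit, then skip the digit run; -1 if no digit or run reaches the end."""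
--     n = len(s)
--     start = next((i for i, c in enumerate(s) if c.isdigit()), n)
--     j = start
--     while j < n and s[j].isdigit():
--         j += 1
--     return j if j < n else -1
-- ===== Notes on version B (the rewrite author's own statement) =====
-- stated objective: alternative
-- what changed: Replaces the single flag-carrying loop by two phases: a generator locates the first digit, then a while loop skips the digit run and returns the stopping index (or -1 if the run reaches the end).
import Mathlib
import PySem

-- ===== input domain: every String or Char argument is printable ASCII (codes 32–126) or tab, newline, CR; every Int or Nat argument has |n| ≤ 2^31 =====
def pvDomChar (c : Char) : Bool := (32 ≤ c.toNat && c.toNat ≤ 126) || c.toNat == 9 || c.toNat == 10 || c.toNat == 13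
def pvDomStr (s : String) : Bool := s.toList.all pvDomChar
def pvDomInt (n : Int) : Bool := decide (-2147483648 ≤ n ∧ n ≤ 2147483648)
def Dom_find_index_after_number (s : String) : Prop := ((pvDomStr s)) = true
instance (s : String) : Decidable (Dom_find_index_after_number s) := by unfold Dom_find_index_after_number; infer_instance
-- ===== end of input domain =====

-- B replaces A's flag-carrying single loop by two phases (find the first digit, then skip the digit run); alternative decomposition, same cost.

-- ===== PORT A =====
-- the for-loop over enumerate(s) with the number_found flag
def pvAGo : List Char → Int → Bool → Int
  | [], _, _ => -1
  | c :: rest, i, found =>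
    if PySem.Chars.isdigit c then pvAGo rest (i + 1) true
    else if found then i
    else pvAGo rest (i + 1) found

def find_index_after_number (s : String) : Int := pvAGo s.toList 0 false

-- ===== PORT B =====
-- phase 1: first index holding a digit, together with the suffix there (none = no digit)
def pvBFind : List Char → Int → Option (Int × List Char)
  | [], _ => none
  | c :: rest, i =>
    if PySem.Chars.isdigit c then some (i, c :: rest) else pvBFind rest (i + 1)

-- phase 2: the while loop advancing j over the digit run; -1 when it reaches the end
def pvBScan : List Char → Int → Int
  | [], _ => -1
  | c :: rest, j => if PySem.Chars.isdigit c then pvBScan rest (j + 1) else j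

def find_index_after_number_alt (s : String) : Int :=
  match pvBFind s.toList 0 with
  | none => -1
  | some (j, suf) => pvBScan suf j

-- ===== PRECONDITION & SPEC =====
def Spec_find_index_after_number (s : String) (out : Int) : Prop := out = find_index_after_number_alt s
instance (s : String) (out : Int) : Decidable (Spec_find_index_after_number s out) := by unfold Spec_find_index_after_number; infer_instance

-- ===== CLAIM (what is proved, stated in full; the proofs are below) =====
def Claim_equal_find_index_after_number : Prop := ∀ (s : String), Dom_find_index_after_number s → Spec_find_index_after_number s (find_index_after_number s)

-- ===== LEMMAS AND PROOFS =====
theorem pvAGo_true_eq_scan (cs : List Char) : ∀ i, pvAGo cs i true = pvBScan cs i := by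
  induction cs with
  | nil => intro i; rfl
  | cons c rest ih =>
    intro i
    simp only [pvAGo, pvBScan]
    split_ifs with h
    · exact ih (i + 1)
    · rfl

theorem pvAGo_false_eq (cs : List Char) : ∀ i,
    pvAGo cs i false = (match pvBFind cs i with
      | none => -1
      | some (j, suf) => pvBScan suf j) := by
  induction cs with
  | nil => intro i; rfl
  | cons c rest ih =>
    intro i
    by_cases h : PySem.Chars.isdigit c = true
    · simp only [pvAGo, pvBFind, h, if_true, pvAGo_true_eq_scan, pvBScan]
    · simp only [pvAGo, pvBFind, h, if_false, Bool.false_eq_true]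
      exact ih (i + 1)

-- ===== VERDICT (by name: the statement is the Claim_ definition above) =====
theorem find_index_after_number_spec : Claim_equal_find_index_after_number := by
  intro s _
  unfold Spec_find_index_after_number find_index_after_number find_index_after_number_alt
  exact pvAGo_false_eq s.toList 0
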